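-- pv_equiv track=rewrite | github.com/1Jayakrishnan/GFG--POTD | JULY 2025/ASCII Range Sum.py | asciirange
-- ===== SOURCE A (Python) =====
-- def asciirange(s):
--     first_pos = {}
--     last_pos = {}
--
--     # Step 1: record first and last positions
--     for i, ch in enumerate(s):
--         if ch not in first_pos:
--             first_pos[ch] = i
--         last_pos[ch] = i  # always updates to latest occurrence
--
--     result = []
--
--     # Step 2: for each char with multiple occurrences, compute sum
--     for ch in first_pos:
--         start = first_pos[ch]
--         end = last_pos[ch]
--         if end > start + 1:  # there are elements strictly in between
--             sum_ascii = sum(ord(s[i]) for i in range(start + 1, end))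
--             if sum_ascii > 0:
--                 result.append(sum_ascii)
--
--     return result
-- ===== SOURCE B (Python) =====
-- def asciirange(s):
--     # prefix sums of ord values: pref[k] = sum of ords of s[:k]
--     pref = [0]
--     t = 0
--     for ch in s:
--         t += ord(ch)
--         pref.append(t)
--     # one dict mapping each char to its (first, last) occurrence span
--     span = {}
--     for i, ch in enumerate(s):
--         span[ch] = (span[ch][0], i) if ch in span else (i, i)
--     res = []
--     for st, en in span.values():
--         d = pref[en] - pref[st + 1]
--         if d > 0:
--             res.append(d)
--     return res
-- ===== Notes on version B (the rewrite author's own statement) =====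
-- stated objective: faster
-- what changed: Replaces the per-character re-summation of s[start+1:end] (a fresh O(n) generator sum for each distinct character) by one prefix-sum array of ord values, so each span sum is an O(1) subtraction; the two position dicts are fused into one span dict.
import Mathlib
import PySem

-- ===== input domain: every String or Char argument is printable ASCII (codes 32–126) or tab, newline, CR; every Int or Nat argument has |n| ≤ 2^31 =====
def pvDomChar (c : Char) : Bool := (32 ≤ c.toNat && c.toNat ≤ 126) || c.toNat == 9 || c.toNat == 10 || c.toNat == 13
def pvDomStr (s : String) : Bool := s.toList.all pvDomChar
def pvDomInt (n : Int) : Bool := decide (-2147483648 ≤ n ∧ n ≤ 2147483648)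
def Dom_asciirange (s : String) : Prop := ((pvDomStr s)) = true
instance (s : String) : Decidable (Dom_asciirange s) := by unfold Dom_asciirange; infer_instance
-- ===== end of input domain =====

-- B replaces A's per-character re-summation of s[start+1:end] by one prefix-sum array of
-- ord values (O(1) subtraction per character) and fuses the two position dicts into one
-- span dict; measured faster (asymptotically: O(n) vs O(n·k) for k distinct characters).

-- ===== PORT A =====
def asciirange (s : String) : List Int :=
  let cs := s.toList
  let fl := (PySem.List.enumerate cs 0).foldl
      (fun (p : PySem.Dict Char Int × PySem.Dict Char Int) e =>
        (if p.1.contains e.2 then p.1 else p.1.insert e.2 e.1, p.2.insert e.2 e.1))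
      (PySem.Dict.empty, PySem.Dict.empty)
  fl.1.keys.foldl (fun res ch =>
    let start := fl.1.getD ch 0
    let e := fl.2.getD ch 0
    if e > start + 1 then
      let sum_ascii := ((PySem.List.pyRange (start + 1) e 1).map
          (fun i => ((PySem.List.pyGetD cs i ' ').toNat : Int))).sum
      if sum_ascii > 0 then res ++ [sum_ascii] else res
    else res) []

-- ===== PORT B =====
def asciirange_alt (s : String) : List Int :=
  let cs := s.toList
  let pt := cs.foldl (fun (p : List Int × Int) ch =>
      (p.1 ++ [p.2 + (ch.toNat : Int)], p.2 + (ch.toNat : Int))) ([0], 0)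
  let pref := pt.1
  let span := (PySem.List.enumerate cs 0).foldl
      (fun (d : PySem.Dict Char (Int × Int)) e =>
        d.insert e.2 (if d.contains e.2 then ((d.getD e.2 (0, 0)).1, e.1) else (e.1, e.1)))
      PySem.Dict.empty
  span.values.foldl (fun res p =>
    let d := PySem.List.pyGetD pref p.2 0 - PySem.List.pyGetD pref (p.1 + 1) 0
    if d > 0 then res ++ [d] else res) []

-- ===== PRECONDITION & SPEC =====
def Spec_asciirange (s : String) (out : List Int) : Prop := out = asciirange_alt s
instance (s : String) (out : List Int) : Decidable (Spec_asciirange s out) := by unfold Spec_asciirange; infer_instance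

-- ===== CLAIM (what is proved, stated in full; the proofs are below) =====
def Claim_equal_asciirange : Prop := ∀ (s : String), Dom_asciirange s → Spec_asciirange s (asciirange s)

-- ===== LEMMAS AND PROOFS =====

-- A's two position dicts, as the two component folds
def pvFirstF (l : List (Int × Char)) (d : PySem.Dict Char Int) : PySem.Dict Char Int :=
  l.foldl (fun d e => if d.contains e.2 then d else d.insert e.2 e.1) d
def pvLastF (l : List (Int × Char)) (d : PySem.Dict Char Int) : PySem.Dict Char Int :=
  l.foldl (fun d e => d.insert e.2 e.1) d
-- B's span dict fold
def pvSpanF (l : List (Int × Char)) (d : PySem.Dict Char (Int × Int)) : PySem.Dict Char (Int × Int) :=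
  l.foldl (fun d e =>
    d.insert e.2 (if d.contains e.2 then ((d.getD e.2 (0, 0)).1, e.1) else (e.1, e.1))) d

def pvOrd (c : Char) : Int := (c.toNat : Int)
def pvSord (t : List Char) : Int := (t.map pvOrd).sum

lemma pv_split (l : List (Int × Char)) :
    (List.foldl (fun (p : PySem.Dict Char Int × PySem.Dict Char Int) e =>
        (if p.1.contains e.2 then p.1 else p.1.insert e.2 e.1, p.2.insert e.2 e.1))
      (PySem.Dict.empty, PySem.Dict.empty) l)
    = (pvFirstF l PySem.Dict.empty, pvLastF l PySem.Dict.empty) :=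
  PySem.List.foldl_prod_mk
    (fun d e => if PySem.Dict.contains d e.2 then d else PySem.Dict.insert d e.2 e.1)
    (fun d e => PySem.Dict.insert d e.2 e.1) l _ _

lemma pv_contains_of_rel (df dl : PySem.Dict Char Int) (ds : PySem.Dict Char (Int × Int))
    (hc : ∀ ch, df.contains ch = dl.contains ch)
    (hr : ∀ ch, ds.get? ch = (df.get? ch).bind fun x => (dl.get? ch).map fun y => (x, y))
    (ch : Char) : ds.contains ch = df.contains ch := by
  have h1 := hr ch
  have h2 := hc ch
  rw [PySem.Dict.contains_eq_isSome_get?, PySem.Dict.contains_eq_isSome_get?] at h2 ⊢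
  cases hf : df.get? ch with
  | none => simp [hf] at h1 ⊢; simp [h1]
  | some x =>
    cases hl : dl.get? ch with
    | none => rw [hf, hl] at h2; simp at h2
    | some y => simp [hf, hl] at h1 ⊢; simp [h1]

lemma pv_rel (l : List (Int × Char)) (df dl : PySem.Dict Char Int) (ds : PySem.Dict Char (Int × Int))
    (hc : ∀ ch, df.contains ch = dl.contains ch)
    (hr : ∀ ch, ds.get? ch = (df.get? ch).bind fun x => (dl.get? ch).map fun y => (x, y))
    (hk : ds.keys = df.keys) :
    (∀ ch, (pvFirstF l df).contains ch = (pvLastF l dl).contains ch) ∧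
    (∀ ch, (pvSpanF l ds).get? ch =
      ((pvFirstF l df).get? ch).bind fun x => ((pvLastF l dl).get? ch).map fun y => (x, y)) ∧
    (pvSpanF l ds).keys = (pvFirstF l df).keys := by
  induction l generalizing df dl ds with
  | nil => exact ⟨hc, hr, hk⟩
  | cons e t ih =>
    have hds : ds.contains e.2 = df.contains e.2 := pv_contains_of_rel df dl ds hc hr e.2
    simp only [pvFirstF, pvLastF, pvSpanF, List.foldl_cons] at ih ⊢
    apply ih
    · intro ch
      by_cases hcf : df.contains e.2 = true
      · by_cases h : ch = e.2
        · subst h; simp [hcf]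
        · simp [hcf, PySem.Dict.contains_insert, h, hc ch]
      · by_cases h : ch = e.2
        · subst h; simp [hcf, PySem.Dict.contains_insert]
        · simp [hcf, PySem.Dict.contains_insert, h, hc ch]
    · intro ch
      by_cases h : ch = e.2
      · subst h
        by_cases hcf : df.contains e.2 = true
        · have hcs : ds.contains e.2 = true := by rw [hds]; exact hcf
          obtain ⟨x, hx⟩ : ∃ x, df.get? e.2 = some x := by
            have hf := hcf
            rw [PySem.Dict.contains_eq_isSome_get?] at hf
            exact Option.isSome_iff_exists.mp hf
          obtain ⟨y, hy⟩ : ∃ y, dl.get? e.2 = some y := by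
            have hcl : dl.contains e.2 = true := by rw [← hc e.2]; exact hcf
            rw [PySem.Dict.contains_eq_isSome_get?] at hcl
            exact Option.isSome_iff_exists.mp hcl
          have hsy : ds.get? e.2 = some (x, y) := by simp [hr e.2, hx, hy]
          have hgd : ds.getD e.2 (0, 0) = (x, y) := PySem.Dict.getD_of_get?_eq_some ds (0, 0) hsy
          simp [hcs, hcf, hgd, hx, PySem.Dict.get?_insert_self]
        · have hcs : ds.contains e.2 = false := by rw [hds]; simpa using hcf
          simp [hcs, hcf, PySem.Dict.get?_insert_self]
      · by_cases hcf : df.contains e.2 = true <;>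
          simp [hcf, PySem.Dict.get?_insert_of_ne _ _ h, hr ch]
    · by_cases hcf : df.contains e.2 = true
      · have hcs : ds.contains e.2 = true := by rw [hds]; exact hcf
        rw [PySem.Dict.keys_insert_of_contains _ _ hcs, if_pos hcf, hk]
      · have hcs : ds.contains e.2 = false := by rw [hds]; simpa using hcf
        rw [PySem.Dict.keys_insert_of_not_contains _ _ hcs, if_neg hcf,
          PySem.Dict.keys_insert_of_not_contains _ _ (by simpa using hcf), hk]

-- values stored by the two position folds all come from l (or the start dict)
lemma pv_firstF_bound (l : List (Int × Char)) (d : PySem.Dict Char Int) (P : Int → Prop)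
    (hl : ∀ e ∈ l, P e.1) (hd : ∀ ch v, d.get? ch = some v → P v) :
    ∀ ch v, (pvFirstF l d).get? ch = some v → P v := by
  induction l generalizing d with
  | nil => exact hd
  | cons e t ih =>
    simp only [pvFirstF, List.foldl_cons] at *
    apply ih
    · intro x hx; exact hl x (by simp [hx])
    · intro ch v hv
      by_cases hcf : d.contains e.2 = true
      · rw [if_pos hcf] at hv; exact hd ch v hv
      · rw [if_neg hcf, PySem.Dict.get?_insert] at hv
        by_cases h : ch = e.2
        · rw [if_pos h] at hv
          exact Option.some.inj hv ▸ hl e (by simp)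
        · rw [if_neg h] at hv; exact hd ch v hv

lemma pv_lastF_bound (l : List (Int × Char)) (d : PySem.Dict Char Int) (P : Int → Prop)
    (hl : ∀ e ∈ l, P e.1) (hd : ∀ ch v, d.get? ch = some v → P v) :
    ∀ ch v, (pvLastF l d).get? ch = some v → P v := by
  induction l generalizing d with
  | nil => exact hd
  | cons e t ih =>
    simp only [pvLastF, List.foldl_cons] at *
    apply ih
    · intro x hx; exact hl x (by simp [hx])
    · intro ch v hv
      rw [PySem.Dict.get?_insert] at hv
      by_cases h : ch = e.2
      · rw [if_pos h] at hv
        exact Option.some.inj hv ▸ hl e (by simp)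
      · rw [if_neg h] at hv; exact hd ch v hv

-- B's prefix fold computes the prefix sums of ord values
lemma pv_pref_eq (cs : List Char) (P : List Int) (t : Int) :
    cs.foldl (fun (p : List Int × Int) ch =>
        (p.1 ++ [p.2 + (ch.toNat : Int)], p.2 + (ch.toNat : Int))) (P, t)
    = (P ++ (List.range cs.length).map (fun k => t + pvSord (cs.take (k + 1))), t + pvSord cs) := by
  induction cs generalizing P t with
  | nil => simp [pvSord]
  | cons c cs ih =>
    rw [List.foldl_cons, ih]
    simp [List.range_succ_eq_map, List.map_map, pvSord, pvOrd, Function.comp, add_assoc]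

lemma pv_pref_get (cs : List Char) (j : Int) (h0 : 0 ≤ j) (h1 : j ≤ (cs.length : Int)) :
    PySem.List.pyGetD ((0 : Int) :: (List.range cs.length).map (fun k => pvSord (cs.take (k + 1)))) j 0
    = pvSord (cs.take j.toNat) := by
  rw [PySem.List.pyGetD_of_nonneg _ _ h0]
  cases hjn : j.toNat with
  | zero => simp [pvSord]
  | succ m =>
    have hm : m < cs.length := by omega
    rw [List.getD_cons_succ]
    rw [List.getD_eq_getElem _ _ (by simpa using hm)]
    simp

lemma pvSord_append (xs ys : List Char) : pvSord (xs ++ ys) = pvSord xs + pvSord ys := by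
  simp [pvSord]

lemma pvSord_singleton (c : Char) : pvSord [c] = (c.toNat : Int) := by
  simp [pvSord, pvOrd]

-- the generator sum in A is a difference of prefix sums
lemma pv_range_sum (cs : List Char) (a : Int) (m : Nat) (h0 : 0 ≤ a)
    (h1 : a + m ≤ (cs.length : Int)) :
    ((PySem.List.pyRange a (a + m)).map
        (fun i => ((PySem.List.pyGetD cs i ' ').toNat : Int))).sum
    = pvSord (cs.take (a + m).toNat) - pvSord (cs.take a.toNat) := by
  induction m with
  | zero =>
    have he : PySem.List.pyRange a a = [] := by
      rw [PySem.List.pyRange_of_pos a a (by norm_num)]; simp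
    simp [he]
  | succ m ih =>
    have hstep : (a + ((m : Int) + 1)) = (a + m) + 1 := by ring
    rw [show ((m + 1 : Nat) : Int) = (m : Int) + 1 by push_cast; ring, hstep,
      PySem.List.pyRange_one_succ_right (by omega : a ≤ a + m)]
    rw [List.map_append, List.sum_append, ih (by push_cast at h1 ⊢; omega)]
    have hk : (a + m).toNat < cs.length := by push_cast at h1; omega
    have hlen : a + (m : Int) < (cs.length : Int) := by push_cast at h1; omega
    have hg : (List.map (fun i => ((PySem.List.pyGetD cs i ' ').toNat : Int)) [a + (m : Int)]).sum
        = ((cs[(a + (m : Int)).toNat]'hk).toNat : Int) := by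
      simp [PySem.List.pyGetD_eq_getElem cs ' ' (by omega : (0:Int) ≤ a + (m : Int)) hlen]
    have ht : cs.take ((a + (m : Int)) + 1).toNat = cs.take (a + m).toNat ++ [cs[(a + m).toNat]] := by
      rw [show ((a + (m : Int)) + 1).toNat = (a + m).toNat + 1 by omega, List.take_add_one]
      simp [List.getElem?_eq_getElem hk]
    rw [hg, ht, pvSord_append, pvSord_singleton]
    ring

lemma pv_sord_lt (cs : List Char) (hpos : ∀ c ∈ cs, 0 < (c.toNat : Int))
    (an bn : Nat) (hab : an < bn) (hb : bn ≤ cs.length) :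
    pvSord (cs.take an) < pvSord (cs.take bn) := by
  have hsplit : cs.take bn = cs.take an ++ (cs.take bn).drop an := by
    conv_lhs => rw [← List.take_append_drop an (cs.take bn)]
    rw [List.take_take, Nat.min_eq_left (by omega)]
  have hne : (cs.take bn).drop an ≠ [] := by
    have : ((cs.take bn).drop an).length = bn - an := by
      simp [List.length_take, Nat.min_eq_left hb]
    intro h; rw [h] at this; simp at this; omega
  have hposd : 0 < pvSord ((cs.take bn).drop an) := by
    apply List.sum_pos
    · intro x hx
      obtain ⟨c, hc, rfl⟩ := List.mem_map.mp hx
      exact hpos c (List.mem_of_mem_take (List.mem_of_mem_drop hc))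
    · simpa [pvSord] using hne
  rw [hsplit]
  simp only [pvSord, List.map_append, List.sum_append] at hposd ⊢
  linarith [hposd]

-- pointwise: A's loop body equals B's loop body on the recorded (first,last) span
lemma pv_body_eq (cs : List Char) (hpos : ∀ c ∈ cs, 0 < (c.toNat : Int))
    (f lv : Int) (hf0 : 0 ≤ f) (hf1 : f < (cs.length : Int))
    (hl0 : 0 ≤ lv) (hl1 : lv < (cs.length : Int)) (acc : List Int) :
    (if lv > f + 1 then
      (if ((PySem.List.pyRange (f + 1) lv).map
            (fun i => ((PySem.List.pyGetD cs i ' ').toNat : Int))).sum > 0 then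
        acc ++ [((PySem.List.pyRange (f + 1) lv).map
            (fun i => ((PySem.List.pyGetD cs i ' ').toNat : Int))).sum]
      else acc)
    else acc)
    = (if PySem.List.pyGetD ((0 : Int) :: (List.range cs.length).map (fun k => pvSord (cs.take (k + 1)))) lv 0
          - PySem.List.pyGetD ((0 : Int) :: (List.range cs.length).map (fun k => pvSord (cs.take (k + 1)))) (f + 1) 0 > 0 then
        acc ++ [PySem.List.pyGetD ((0 : Int) :: (List.range cs.length).map (fun k => pvSord (cs.take (k + 1)))) lv 0
          - PySem.List.pyGetD ((0 : Int) :: (List.range cs.length).map (fun k => pvSord (cs.take (k + 1)))) (f + 1) 0]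
      else acc) := by
  rw [pv_pref_get cs lv hl0 (by omega), pv_pref_get cs (f + 1) (by omega) (by omega)]
  by_cases h : f + 1 < lv
  · have hm : lv = (f + 1) + ((lv - f - 1).toNat : Int) := by omega
    have hsum := pv_range_sum cs (f + 1) (lv - f - 1).toNat (by omega) (by omega)
    rw [← hm] at hsum
    rw [if_pos h, hsum]
  · rw [if_neg h]
    have hle : lv ≤ f + 1 := by omega
    rcases eq_or_lt_of_le hle with heq | hlt
    · rw [heq]; simp
    · have hgt : pvSord (cs.take lv.toNat) < pvSord (cs.take (f + 1).toNat) :=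
        pv_sord_lt cs hpos lv.toNat (f + 1).toNat (by omega) (by omega)
      rw [if_neg (by linarith [hgt])]

-- ===== VERDICT (by name: the statement is the Claim_ definition above) =====
theorem asciirange_spec : Claim_equal_asciirange := by
  intro s hdom
  unfold Spec_asciirange asciirange asciirange_alt
  simp only [pv_split, pv_pref_eq, zero_add, List.singleton_append]
  have hspan : (PySem.List.enumerate s.toList 0).foldl
      (fun (d : PySem.Dict Char (Int × Int)) (e : Int × Char) =>
        d.insert e.2 (if d.contains e.2 then ((d.getD e.2 (0, 0)).1, e.1) else (e.1, e.1)))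
      PySem.Dict.empty = pvSpanF (PySem.List.enumerate s.toList 0) PySem.Dict.empty := rfl
  rw [hspan]
  obtain ⟨hcE, hrE, hkE⟩ := pv_rel (PySem.List.enumerate s.toList 0)
    PySem.Dict.empty PySem.Dict.empty PySem.Dict.empty (fun _ => rfl)
    (by intro ch; simp [PySem.Dict.get?_empty]) rfl
  have hnodup : (pvSpanF (PySem.List.enumerate s.toList 0) PySem.Dict.empty).keys.Nodup := by
    show (List.foldl (fun (d : PySem.Dict Char (Int × Int)) (e : Int × Char) =>
        d.insert e.2 (if d.contains e.2 then ((d.getD e.2 (0, 0)).1, e.1) else (e.1, e.1)))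
      PySem.Dict.empty (PySem.List.enumerate s.toList 0)).keys.Nodup
    exact PySem.Dict.nodup_keys_foldl_insert_key (PySem.List.enumerate s.toList 0)
      (fun (e : Int × Char) => e.2)
      (fun (d : PySem.Dict Char (Int × Int)) (e : Int × Char) =>
        if d.contains e.2 then ((d.getD e.2 (0, 0)).1, e.1) else (e.1, e.1))
      PySem.Dict.empty (by simp [PySem.Dict.keys_empty])
  rw [PySem.Dict.values_eq_map_keys _ hnodup (0, 0), List.foldl_map, hkE]
  have hpos : ∀ c ∈ s.toList, 0 < (c.toNat : Int) := by
    intro c hc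
    have hd := List.all_eq_true.mp hdom c hc
    simp [pvDomChar] at hd
    omega
  have hbnd : ∀ e ∈ PySem.List.enumerate s.toList 0, 0 ≤ e.1 ∧ e.1 < (s.toList.length : Int) := by
    intro e he
    obtain ⟨k, hk, rfl⟩ := (PySem.List.mem_enumerate_iff _ _ _).mp he
    constructor
    · show (0 : Int) ≤ 0 + (k : Int)
      omega
    · show (0 : Int) + (k : Int) < (s.toList.length : Int)
      omega
  apply PySem.List.foldl_congr_mem
  intro acc ch hch
  have hcontF : (pvFirstF (PySem.List.enumerate s.toList 0) PySem.Dict.empty).contains ch = true :=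
    (PySem.Dict.contains_iff_mem_keys _ _).mpr hch
  obtain ⟨fv, hfv⟩ : ∃ v, (pvFirstF (PySem.List.enumerate s.toList 0) PySem.Dict.empty).get? ch = some v := by
    rw [PySem.Dict.contains_eq_isSome_get?] at hcontF
    exact Option.isSome_iff_exists.mp hcontF
  obtain ⟨lv, hlv⟩ : ∃ v, (pvLastF (PySem.List.enumerate s.toList 0) PySem.Dict.empty).get? ch = some v := by
    have hcl := (hcE ch).symm.trans hcontF
    rw [PySem.Dict.contains_eq_isSome_get?] at hcl
    exact Option.isSome_iff_exists.mp hcl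
  have hsv : (pvSpanF (PySem.List.enumerate s.toList 0) PySem.Dict.empty).get? ch = some (fv, lv) := by
    simp [hrE ch, hfv, hlv]
  have g1 : (pvFirstF (PySem.List.enumerate s.toList 0) PySem.Dict.empty).getD ch 0 = fv :=
    PySem.Dict.getD_of_get?_eq_some _ 0 hfv
  have g2 : (pvLastF (PySem.List.enumerate s.toList 0) PySem.Dict.empty).getD ch 0 = lv :=
    PySem.Dict.getD_of_get?_eq_some _ 0 hlv
  have g3 : (pvSpanF (PySem.List.enumerate s.toList 0) PySem.Dict.empty).getD ch (0, 0) = (fv, lv) :=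
    PySem.Dict.getD_of_get?_eq_some _ (0, 0) hsv
  simp only [g1, g2, g3]
  obtain ⟨hf0, hf1⟩ := pv_firstF_bound (PySem.List.enumerate s.toList 0) PySem.Dict.empty
    (fun v => 0 ≤ v ∧ v < (s.toList.length : Int)) hbnd
    (by intro c v hv; rw [PySem.Dict.get?_empty] at hv; cases hv) ch fv hfv
  obtain ⟨hl0, hl1⟩ := pv_lastF_bound (PySem.List.enumerate s.toList 0) PySem.Dict.empty
    (fun v => 0 ≤ v ∧ v < (s.toList.length : Int)) hbnd
    (by intro c v hv; rw [PySem.Dict.get?_empty] at hv; cases hv) ch lv hlv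
  exact pv_body_eq s.toList hpos fv lv hf0 hf1 hl0 hl1 acc
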